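-- pv_equiv track=rewrite | github.com/pratit989/JARVIS | J.A.R.V.I.S._Mark_II.py | pause
-- ===== SOURCE A (Python) =====
-- def pause(voice_note_para, pause_word_dict):
--     for key_var, value_var in pause_word_dict.items():
--         try:
--             if key_var in voice_note_para:
--                 return True
--         except IndexError:
--             pass
--     return False
-- ===== SOURCE B (Python) =====
-- def pause(voice_note_para, pause_word_dict):
--     n = len(voice_note_para)
--     return any(voice_note_para.startswith(k, i)
--                for i in range(n + 1)
--                for k in pause_word_dict)
-- ===== Notes on version B (the rewrite author's own statement) =====
-- stated objective: alternative
-- what changed: Key-major substring tests (each key scanned independently with 'in') replaced by a single position-major scan over the text that tests every key with startswith at each position.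
import Mathlib
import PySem

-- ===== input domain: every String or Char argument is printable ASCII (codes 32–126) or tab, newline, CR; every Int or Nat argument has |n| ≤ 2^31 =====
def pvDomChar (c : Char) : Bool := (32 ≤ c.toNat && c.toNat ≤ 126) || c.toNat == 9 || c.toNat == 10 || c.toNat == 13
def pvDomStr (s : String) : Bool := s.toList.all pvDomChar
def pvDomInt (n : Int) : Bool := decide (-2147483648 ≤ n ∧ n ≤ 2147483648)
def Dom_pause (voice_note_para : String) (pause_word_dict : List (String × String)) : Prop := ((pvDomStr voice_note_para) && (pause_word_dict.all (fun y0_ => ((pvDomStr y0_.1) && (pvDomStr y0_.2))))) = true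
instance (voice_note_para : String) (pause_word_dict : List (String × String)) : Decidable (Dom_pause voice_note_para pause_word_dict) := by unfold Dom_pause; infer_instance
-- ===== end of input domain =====

-- B replaces A's key-major 'key in text' loop by a position-major scan of the text testing every key with startswith at each position (alternative traversal, same cost).
-- ===== PORT A =====
-- for key_var, value_var in pause_word_dict.items(): if key_var in voice_note_para: return True / return False
def pauseLoop (voice_note_para : String) : List (String × String) → Bool
  | [] => false
  | (key_var, _value_var) :: rest =>
      if PySem.Str.isIn key_var voice_note_para then true
      else pauseLoop voice_note_para rest

def pause (voice_note_para : String) (pause_word_dict : List (String × String)) : Bool :=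
  pauseLoop voice_note_para pause_word_dict

-- ===== PORT B =====
-- any(voice_note_para.startswith(k, i) for i in range(n + 1) for k in pause_word_dict)
def pause_alt (voice_note_para : String) (pause_word_dict : List (String × String)) : Bool :=
  let cs := voice_note_para.toList
  (List.range (cs.length + 1)).any (fun i =>
    pause_word_dict.any (fun kv => PySem.Chars.startswith (cs.drop i) kv.1.toList))

-- ===== PRECONDITION & SPEC =====
def Spec_pause (voice_note_para : String) (pause_word_dict : List (String × String)) (out : Bool) : Prop := out = pause_alt voice_note_para pause_word_dict
instance (voice_note_para : String) (pause_word_dict : List (String × String)) (out : Bool) : Decidable (Spec_pause voice_note_para pause_word_dict out) := by unfold Spec_pause; infer_instance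

-- ===== CLAIM (what is proved, stated in full; the proofs are below) =====
def Claim_equal_pause : Prop := ∀ (voice_note_para : String) (pause_word_dict : List (String × String)), Dom_pause voice_note_para pause_word_dict → Spec_pause voice_note_para pause_word_dict (pause voice_note_para pause_word_dict)

-- ===== LEMMAS AND PROOFS =====

-- ===== VERDICT (by name: the statement is the Claim_ definition above) =====
-- for one key: the position-major scan over all start positions equals Python's 'key in text'
theorem any_startswith_drop_eq_isIn (cs k : List Char) :
    (List.range (cs.length + 1)).any (fun i => PySem.Chars.startswith (cs.drop i) k)
      = PySem.Chars.isIn k cs := by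
  by_cases h : PySem.Chars.isIn k cs = true
  · rw [h, List.any_eq_true]
    obtain ⟨j, hj⟩ := (PySem.Chars.exists_prefix_drop_iff_isIn k cs).mpr h
    refine ⟨min j cs.length, List.mem_range.mpr (by omega), ?_⟩
    rw [PySem.Chars.startswith_iff]
    rcases le_or_gt j cs.length with hle | hgt
    · simpa [Nat.min_eq_left hle] using hj
    · have : cs.drop j = [] := List.drop_eq_nil_of_le (by omega)
      simp only [Nat.min_eq_right (le_of_lt hgt)]
      rw [List.drop_eq_nil_of_le (le_refl _)]
      simpa [this] using hj
  · rw [eq_false_of_ne_true h, List.any_eq_false]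
    intro i _
    simp only [Bool.not_eq_true]
    by_contra hsw
    rw [Bool.not_eq_false, PySem.Chars.startswith_iff] at hsw
    exact h ((PySem.Chars.exists_prefix_drop_iff_isIn k cs).mp ⟨i, hsw⟩)

theorem pauseLoop_eq_any (t : String) (d : List (String × String)) :
    pauseLoop t d = d.any (fun kv => PySem.Str.isIn kv.1 t) := by
  induction d with
  | nil => rfl
  | cons kv rest ih =>
      obtain ⟨k, v⟩ := kv
      simp only [pauseLoop, List.any_cons, ← ih]
      cases h : PySem.Str.isIn k t <;> simp

theorem pause_spec : Claim_equal_pause := by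
  intro t d _
  unfold Spec_pause pause pause_alt
  rw [pauseLoop_eq_any]
  rw [Bool.eq_iff_iff, List.any_eq_true, List.any_eq_true]
  simp only [List.any_eq_true, PySem.Str.isIn_eq]
  constructor
  · rintro ⟨kv, hm, hin⟩
    rw [← any_startswith_drop_eq_isIn, List.any_eq_true] at hin
    obtain ⟨i, hi, hsw⟩ := hin
    exact ⟨i, hi, kv, hm, hsw⟩
  · rintro ⟨i, hi, kv, hm, hsw⟩
    refine ⟨kv, hm, ?_⟩
    rw [← any_startswith_drop_eq_isIn, List.any_eq_true]
    exact ⟨i, hi, hsw⟩
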